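-- pv_equiv track=rewrite | github.com/wesdoyle/scottish-wdb | scottish-witchcraft.data/scripts/GenerateWDBData.py | get_data_types
-- ===== SOURCE A (Python) =====
-- def get_data_types(tables_dict):
--     table_cols = [cols for table, cols in tables_dict.items()]
--
--     dtypes = []
--     for col in table_cols:
--         for colname, dtype in col.items():
--             if dtype not in dtypes:
--                 dtypes.append(dtype)
--     return dtypes
-- ===== SOURCE B (Python) =====
-- def get_data_types(tables_dict):
--     rest = [dtype for cols in tables_dict.values() for dtype in cols.values()]
--     out = []
--     while rest:
--         head = rest[0]
--         out.append(head)
--         rest = [x for x in rest if x != head]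
--     return out
-- ===== Notes on version B (the rewrite author's own statement) =====
-- stated objective: alternative
-- what changed: Replaced A's grow-and-test dedup (membership check against the accumulated result inside the nested loop) by a selection sieve over a flattened worklist: repeatedly emit the first remaining element and delete every occurrence of it from the worklist, so no membership test or dedup container exists at all.
import Mathlib
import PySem

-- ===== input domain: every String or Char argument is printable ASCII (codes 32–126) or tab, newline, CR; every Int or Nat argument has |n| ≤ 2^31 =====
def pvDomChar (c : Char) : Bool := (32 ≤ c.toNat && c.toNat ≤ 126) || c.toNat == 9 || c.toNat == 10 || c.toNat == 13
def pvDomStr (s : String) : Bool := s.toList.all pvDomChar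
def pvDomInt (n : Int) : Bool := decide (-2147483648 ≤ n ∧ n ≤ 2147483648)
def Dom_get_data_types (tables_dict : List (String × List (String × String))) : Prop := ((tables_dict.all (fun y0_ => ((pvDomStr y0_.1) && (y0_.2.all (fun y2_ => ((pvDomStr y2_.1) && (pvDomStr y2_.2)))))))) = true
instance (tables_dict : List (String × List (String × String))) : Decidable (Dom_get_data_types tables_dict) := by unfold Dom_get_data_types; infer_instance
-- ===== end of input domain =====

-- B replaces A's grow-and-test dedup (membership check against the accumulated result) by a
-- selection sieve over a flattened worklist: emit the first remaining element, delete all its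
-- occurrences, repeat — no membership test and no dedup container; same values, first-seen order.

-- ===== PORT A =====
def get_data_types (tables_dict : List (String × List (String × String))) : List String :=
  let table_cols := tables_dict.map (fun p => p.2)
  table_cols.foldl
    (fun dtypes col =>
      col.foldl (fun dtypes q => if q.2 ∈ dtypes then dtypes else dtypes ++ [q.2]) dtypes)
    []

-- ===== PORT B =====
-- the 'while rest:' loop of Source B: emit rest[0], then keep only the elements different from it
def sieveLoop (out rest : List String) : List String :=
  match rest with
  | [] => out
  | head :: tl =>
      sieveLoop (out ++ [head]) ((head :: tl).filter (fun x => x ≠ head))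
termination_by rest.length
decreasing_by
  simp only [List.filter_cons, ne_eq, not_true_eq_false, decide_false, if_neg,
    Bool.false_eq_true, not_false_eq_true]
  exact Nat.lt_succ_of_le (List.length_filter_le _ _)

def get_data_types_alt (tables_dict : List (String × List (String × String))) : List String :=
  let rest := tables_dict.flatMap (fun p => p.2.map (fun q => q.2))
  sieveLoop [] rest

-- ===== PRECONDITION & SPEC =====
def Spec_get_data_types (tables_dict : List (String × List (String × String))) (out : List String) : Prop := out = get_data_types_alt tables_dict
instance (tables_dict : List (String × List (String × String))) (out : List String) : Decidable (Spec_get_data_types tables_dict out) := by unfold Spec_get_data_types; infer_instance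

-- ===== CLAIM (what is proved, stated in full; the proofs are below) =====
def Claim_equal_get_data_types : Prop := ∀ (tables_dict : List (String × List (String × String))), Dom_get_data_types tables_dict → Spec_get_data_types tables_dict (get_data_types tables_dict)

-- ===== LEMMAS AND PROOFS =====

-- A's inner loop is Set.update with the dtypes of one column.
theorem inner_eq_update (col : List (String × String)) (s : List String) :
    col.foldl (fun dtypes q => if q.2 ∈ dtypes then dtypes else dtypes ++ [q.2]) s
      = PySem.Set.update s (col.map (fun q => q.2)) := by
  rw [PySem.Set.update_map_eq_foldl_add]
  exact PySem.List.foldl_congr_mem _ _ _ _ (fun acc q _ => (PySem.Set.add_eq_ite acc q.2).symm)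

-- Folding Set.update over the tables is one update with the flattened dtype list.
theorem outer_eq_update (tcs : List (List (String × String))) (s : List String) :
    tcs.foldl (fun acc col => PySem.Set.update acc (col.map (fun q => q.2))) s
      = PySem.Set.update s (tcs.flatMap (fun col => col.map (fun q => q.2))) := by
  induction tcs generalizing s with
  | nil => simp [PySem.Set.update_nil]
  | cons c t ih => simp [List.foldl_cons, ih, PySem.Set.update_append]

-- Updating with elements already filtered against a member of s changes nothing.
theorem update_filter_mem (t : List String) (s : List String) (x : String) (hx : x ∈ s) :
    PySem.Set.update s t = PySem.Set.update s (t.filter (fun y => y ≠ x)) := by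
  induction t generalizing s with
  | nil => simp
  | cons y t' ih =>
      by_cases h : y = x
      · subst h
        simp only [List.filter_cons, ne_eq, not_true_eq_false, decide_false, if_neg,
          Bool.false_eq_true, not_false_eq_true]
        rw [PySem.Set.update, List.foldl_cons, PySem.Set.add_eq_ite, if_pos hx]
        exact ih s hx
      · simp only [List.filter_cons, ne_eq, h, not_false_eq_true, decide_true, if_pos]
        rw [PySem.Set.update, List.foldl_cons, PySem.Set.update, List.foldl_cons]
        exact ih _ (by rw [PySem.Set.add_eq_ite]; split <;> simp [hx])

-- A leading element absent from the additions commutes out of Set.update.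
theorem update_cons_not_mem (t : List String) (s : List String) (x : String) (hx : x ∉ t) :
    PySem.Set.update (x :: s) t = x :: PySem.Set.update s t := by
  induction t generalizing s with
  | nil => simp [PySem.Set.update_nil]
  | cons y t' ih =>
      have hyx : y ≠ x := fun h => hx (h ▸ List.mem_cons_self ..)
      rw [PySem.Set.update, List.foldl_cons, PySem.Set.update, List.foldl_cons]
      have hadd : PySem.Set.add (x :: s) y = x :: PySem.Set.add s y := by
        rw [PySem.Set.add_eq_ite, PySem.Set.add_eq_ite]
        by_cases h : y ∈ s
        · simp [h, List.mem_cons, hyx]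
        · simp [h, List.mem_cons, hyx]
      rw [hadd]
      exact ih _ (fun h => hx (List.mem_cons_of_mem _ h))

-- The sieve step of Set.ofList.
theorem ofList_cons_sieve (x : String) (t : List String) :
    PySem.Set.ofList (x :: t) = x :: PySem.Set.ofList (t.filter (fun y => y ≠ x)) := by
  have h1 : PySem.Set.ofList (x :: t) = PySem.Set.update [x] t := by
    rw [PySem.Set.ofList_eq_foldl, List.foldl_cons]
    rfl
  have h2 : PySem.Set.ofList (t.filter (fun y => y ≠ x))
      = PySem.Set.update [] (t.filter (fun y => y ≠ x)) := by
    rw [PySem.Set.ofList_eq_foldl]; rfl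
  rw [h1, update_filter_mem t [x] x (List.mem_singleton.mpr rfl),
    update_cons_not_mem _ _ _ (by simp), h2]

-- B's sieve loop computes out ++ set-of-list of the worklist.
theorem sieveLoop_eq_ofList (out rest : List String) :
    sieveLoop out rest = out ++ PySem.Set.ofList rest :=
  match rest with
  | [] => by simp [sieveLoop, PySem.Set.ofList]
  | head :: tl => by
      have hf : (head :: tl).filter (fun x => x ≠ head) = tl.filter (fun y => y ≠ head) := by
        simp
      rw [sieveLoop, sieveLoop_eq_ofList (out ++ [head]) _, hf, ofList_cons_sieve]
      simp
termination_by rest.length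
decreasing_by
  simp only [List.filter_cons, ne_eq, not_true_eq_false, decide_false, if_neg,
    Bool.false_eq_true, not_false_eq_true]
  exact Nat.lt_succ_of_le (List.length_filter_le _ _)

-- ===== VERDICT (by name: the statement is the Claim_ definition above) =====
theorem get_data_types_spec : Claim_equal_get_data_types := by
  intro tables_dict _
  unfold Spec_get_data_types get_data_types get_data_types_alt
  rw [sieveLoop_eq_ofList, List.nil_append]
  calc (tables_dict.map (fun p => p.2)).foldl
        (fun dtypes col => col.foldl (fun dtypes q => if q.2 ∈ dtypes then dtypes else dtypes ++ [q.2]) dtypes) []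
      = (tables_dict.map (fun p => p.2)).foldl
        (fun acc col => PySem.Set.update acc (col.map (fun q => q.2))) [] :=
        PySem.List.foldl_congr_mem _ _ _ _ (fun acc col _ => inner_eq_update col acc)
    _ = PySem.Set.update []
        ((tables_dict.map (fun p => p.2)).flatMap (fun col => col.map (fun q => q.2))) :=
        outer_eq_update _ _
    _ = PySem.Set.ofList (tables_dict.flatMap (fun p => p.2.map (fun q => q.2))) := by
        rw [PySem.Set.update_nil_left, List.flatMap_map]
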